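-- pv_equiv track=rewrite | github.com/Federicojaviermartino/logiaccounting-pro | logiaccounting-pro/backend/app/services/ml/feature_engineering.py | add_lag_features
-- ===== SOURCE A (Python) =====
-- from typing import Dict, List, Any, Optional
--
-- def add_lag_features(
--
--     time_series: List[Dict],
--     value_key: str = 'value',
--     lags: List[int] = [1, 7, 14, 30]
-- ) -> List[Dict]:
--     """
--     Add lagged values as features
--
--     Args:
--         lags: List of lag periods (e.g., [1, 7, 30] for 1 day, 1 week, 1 month)
--     """
--     result = []
--     values = [d.get(value_key, 0) for d in time_series]
--
--     for i, item in enumerate(time_series):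
--         enhanced = dict(item)
--
--         for lag in lags:
--             if i >= lag:
--                 enhanced[f'lag_{lag}'] = values[i - lag]
--             else:
--                 enhanced[f'lag_{lag}'] = 0
--
--         result.append(enhanced)
--
--     return result
-- ===== SOURCE B (Python) =====
-- def add_lag_features(
--     time_series,
--     value_key='value',
--     lags=[1, 7, 14, 30]
-- ):
--     """Column-wise lag features: copy rows once, then write one shifted column per lag."""
--     n = len(time_series)
--     result = [dict(item) for item in time_series]
--     values = [d.get(value_key, 0) for d in time_series]
--     for lag in lags:
--         key = f'lag_{lag}'
--         col = [0] * min(lag, n) + values[:max(0, n - lag)]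
--         for r, v in zip(result, col):
--             r[key] = v
--     return result
-- ===== Notes on version B (the rewrite author's own statement) =====
-- stated objective: alternative
-- what changed: A makes one pass over rows, deciding each lag cell with a per-element index check; B copies all rows once, materializes each lag as an explicit zero-padded shifted column, and writes it column-wise across the result dicts.
import Mathlib
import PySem

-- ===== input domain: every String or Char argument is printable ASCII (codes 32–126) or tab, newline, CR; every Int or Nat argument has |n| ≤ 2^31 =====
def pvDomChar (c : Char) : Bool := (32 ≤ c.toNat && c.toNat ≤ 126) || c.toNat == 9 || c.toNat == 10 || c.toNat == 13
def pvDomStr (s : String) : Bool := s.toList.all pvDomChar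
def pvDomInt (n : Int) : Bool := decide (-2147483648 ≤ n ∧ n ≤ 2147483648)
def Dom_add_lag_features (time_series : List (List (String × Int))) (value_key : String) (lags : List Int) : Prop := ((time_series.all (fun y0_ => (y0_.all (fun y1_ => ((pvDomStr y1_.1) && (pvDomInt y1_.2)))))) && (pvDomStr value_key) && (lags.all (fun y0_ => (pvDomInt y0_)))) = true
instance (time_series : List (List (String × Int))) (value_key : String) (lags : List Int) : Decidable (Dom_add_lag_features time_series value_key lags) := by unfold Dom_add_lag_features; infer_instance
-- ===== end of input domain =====

-- B rewrites A's single row-pass (per-element lag index checks) as L column-passes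
-- over explicitly materialized zero-padded shifted columns; alternative decomposition, same cost.


-- ===== PORT A =====
-- Transliteration of A. `values[i - lag]` is `(pyGet? …).getD 0`: the `none` (IndexError)
-- case is only reachable for a negative lag with non-empty input, which Pre_ excludes.
def add_lag_features (time_series : List (List (String × Int))) (value_key : String) (lags : List Int) : List (List (String × Int)) :=
  let values : List Int := time_series.map (fun d => (PySem.Dict.ofList d).getD value_key 0)
  let result : List (PySem.Dict String Int) :=
    (PySem.List.enumerate time_series).foldl
      (fun result p =>
        let i : Int := p.1
        let item := p.2
        let enhanced := PySem.Dict.ofList item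
        let enhanced := lags.foldl
          (fun enhanced lag =>
            if lag ≤ i then
              enhanced.insert ("lag_" ++ PySem.Int.toStr lag) ((PySem.List.pyGet? values (i - lag)).getD 0)
            else
              enhanced.insert ("lag_" ++ PySem.Int.toStr lag) 0)
          enhanced
        result ++ [enhanced])
      []
  result.map (fun d => d.items)

-- ===== PORT B =====
def add_lag_features_alt (time_series : List (List (String × Int))) (value_key : String) (lags : List Int) : List (List (String × Int)) :=
  let n : Int := time_series.length
  let result : List (PySem.Dict String Int) := time_series.map (fun item => PySem.Dict.ofList item)
  let values : List Int := time_series.map (fun d => (PySem.Dict.ofList d).getD value_key 0)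
  let final : List (PySem.Dict String Int) :=
    lags.foldl
      (fun result lag =>
        let key := "lag_" ++ PySem.Int.toStr lag
        let col : List Int :=
          List.replicate (min lag n).toNat 0 ++ PySem.List.slice values none (some (max 0 (n - lag)))
        (result.zip col).map (fun p => p.1.insert key p.2))
      result
  final.map (fun d => d.items)

-- ===== PRECONDITION & SPEC =====
-- Pre_ excludes exactly the inputs where A raises IndexError: a negative lag with a
-- non-empty time_series (there `values[i - lag]` indexes past the end for the last rows).
def Pre_add_lag_features (time_series : List (List (String × Int))) (value_key : String) (lags : List Int) : Prop :=
  time_series = [] ∨ ∀ lag ∈ lags, 0 ≤ lag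
instance (time_series : List (List (String × Int))) (value_key : String) (lags : List Int) : Decidable (Pre_add_lag_features time_series value_key lags) := by unfold Pre_add_lag_features; infer_instance

def pvWitness_add_lag_features : (List (List (String × Int))) × String × List Int :=
  ([[("value", 3)], [("value", 5), ("x", 1)], [("value", 7)]], "value", [1, 2])

def Spec_add_lag_features (time_series : List (List (String × Int))) (value_key : String) (lags : List Int) (out : List (List (String × Int))) : Prop := out = add_lag_features_alt time_series value_key lags
instance (time_series : List (List (String × Int))) (value_key : String) (lags : List Int) (out : List (List (String × Int))) : Decidable (Spec_add_lag_features time_series value_key lags out) := by unfold Spec_add_lag_features; infer_instance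

-- ===== CLAIM (what is proved, stated in full; the proofs are below) =====
def Claim_equal_add_lag_features : Prop := ∀ (time_series : List (List (String × Int))) (value_key : String) (lags : List Int), Dom_add_lag_features time_series value_key lags → Pre_add_lag_features time_series value_key lags → Spec_add_lag_features time_series value_key lags (add_lag_features time_series value_key lags)

-- ===== LEMMAS AND PROOFS =====

-- A's per-row value for a lag cell
def pvAval (values : List Int) (i : Nat) (lag : Int) : Int :=
  if lag ≤ (i : Int) then (PySem.List.pyGet? values ((i : Int) - lag)).getD 0 else 0

-- B's shifted column for a lag
def pvCol (values : List Int) (n : Int) (lag : Int) : List Int :=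
  List.replicate (min lag n).toNat 0 ++ PySem.List.slice values none (some (max 0 (n - lag)))

lemma pvCol_length (values : List Int) (lag : Int) :
    (pvCol values values.length lag).length = values.length := by
  unfold pvCol
  rw [PySem.List.slice_to _ (le_max_left 0 _)]
  simp only [List.length_append, List.length_replicate, List.length_take]
  omega

-- any list is the range-indexed map of its getD
lemma pvMap_eq_map_range {α β : Type} (f : α → β) (d : α) (l : List α) :
    l.map f = (List.range l.length).map (fun i => f (l.getD i d)) := by
  apply List.ext_getElem
  · simp
  · intro i h1 h2
    simp [List.getD_eq_getElem?_getD, List.getElem?_eq_getElem (by simpa using h2)]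

lemma pvList_eq_map_range (l : List Int) :
    l = (List.range l.length).map (fun i => l.getD i 0) := by
  conv_lhs => rw [← List.map_id l]
  exact pvMap_eq_map_range id 0 l

-- the append-accumulator row loop is a map
lemma pvFoldl_push {α β : Type} (f : α → β) (l : List α) (acc : List β) :
    l.foldl (fun r x => r ++ [f x]) acc = acc ++ l.map f := by
  induction l generalizing acc with
  | nil => simp
  | cons x xs ih => simp [ih]

-- mapping over enumerate = mapping over range
lemma pvMap_enumerate {α β : Type} (f : Int × α → β) (d : α) (xs : List α) : ∀ s : Int,
    (PySem.List.enumerate xs s).map f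
      = (List.range xs.length).map (fun i : Nat => f (s + (i : Int), xs.getD i d)) := by
  induction xs with
  | nil => intro s; simp [PySem.List.enumerate_nil]
  | cons x xs ih =>
    intro s
    rw [PySem.List.enumerate_cons, List.map_cons, ih (s + 1)]
    rw [List.length_cons, List.range_succ_eq_map, List.map_cons, List.map_map]
    simp only [Nat.cast_zero, add_zero, List.getD_cons_zero]
    refine congrArg (f (s, x) :: ·) (List.map_congr_left ?_)
    intro i _
    simp only [Function.comp_apply, List.getD_cons_succ]
    push_cast
    ring_nf

-- one column-pass of B, on a range-shaped accumulator, acts pointwise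
lemma pvB_step (n : Nat) (D : Nat → PySem.Dict String Int) (key : String) (col : List Int)
    (hlen : col.length = n) :
    (((List.range n).map D).zip col).map (fun p => p.1.insert key p.2)
      = (List.range n).map (fun i => (D i).insert key (col.getD i 0)) := by
  have hc : col = (List.range n).map (fun i => col.getD i 0) := by
    conv_lhs => rw [pvList_eq_map_range col, hlen]
  conv_lhs => rw [hc]
  rw [List.zip_map', List.map_map]
  rfl

-- B's whole lag loop, on a range-shaped accumulator, acts pointwise
lemma pvB_fold (values : List Int) (lags : List Int) (n : Nat) (hn : n = values.length) :
    ∀ D : Nat → PySem.Dict String Int,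
    lags.foldl
      (fun result lag =>
        (result.zip (pvCol values (n : Int) lag)).map
          (fun p => p.1.insert ("lag_" ++ PySem.Int.toStr lag) p.2))
      ((List.range n).map D)
      = (List.range n).map (fun i =>
          lags.foldl
            (fun e lag => e.insert ("lag_" ++ PySem.Int.toStr lag) ((pvCol values (n : Int) lag).getD i 0))
            (D i)) := by
  induction lags with
  | nil => intro D; simp
  | cons l ls ih =>
    intro D
    rw [List.foldl_cons,
      pvB_step n D ("lag_" ++ PySem.Int.toStr l) (pvCol values (n : Int) l)
        (by rw [hn]; exact pvCol_length values l),
      ih]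
    simp

-- pointwise agreement of A's cell values and B's column entries, for 0 ≤ lag
lemma pvVal_eq (values : List Int) (n i : Nat) (lag : Int) (hn : values.length = n)
    (hi : i < values.length) (hlag : 0 ≤ lag) :
    pvAval values i lag = (pvCol values (n : Int) lag).getD i 0 := by
  subst hn
  unfold pvAval pvCol
  rw [PySem.List.slice_to _ (le_max_left 0 _)]
  by_cases h : lag ≤ (i : Int)
  · rw [if_pos h]
    have hlt : lag < (values.length : Int) := lt_of_le_of_lt h (by exact_mod_cast hi)
    have hmin : (min lag (values.length : Int)).toNat = lag.toNat := by omega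
    have hmax : (max 0 ((values.length : Int) - lag)).toNat = values.length - lag.toNat := by omega
    have hidx : (i : Int) - lag = ((i - lag.toNat : Nat) : Int) := by omega
    rw [hidx, PySem.List.pyGet?_natCast, hmin, hmax]
    have hlt2 : i - lag.toNat < values.length := by omega
    rw [List.getElem?_eq_getElem hlt2]
    rw [List.getD_append_right _ _ _ _ (by simp only [List.length_replicate]; omega)]
    simp only [List.length_replicate]
    rw [List.getD_eq_getElem?_getD, List.getElem?_take_of_lt (by omega),
      List.getElem?_eq_getElem hlt2]
  · rw [if_neg h]
    have hmem : i < (min lag (values.length : Int)).toNat := by omega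
    rw [List.getD_append _ _ _ i (by simpa using hmem)]
    exact (List.getD_replicate _ hmem).symm

-- A in range-indexed normal form (unconditional)
lemma pvA_normal (time_series : List (List (String × Int))) (value_key : String) (lags : List Int) :
    add_lag_features time_series value_key lags
      = (List.range time_series.length).map (fun i =>
          (lags.foldl
            (fun e lag => e.insert ("lag_" ++ PySem.Int.toStr lag)
              (pvAval (time_series.map (fun d => (PySem.Dict.ofList d).getD value_key 0)) i lag))
            (PySem.Dict.ofList (time_series.getD i []))).items) := by
  simp only [add_lag_features]
  rw [pvFoldl_push, List.nil_append, List.map_map, pvMap_enumerate _ ([] : List (String × Int))]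
  refine List.map_congr_left (fun i _ => ?_)
  simp only [Function.comp_apply, zero_add]
  congr 1
  refine PySem.List.foldl_congr_mem _ _ _ _ (fun e lag _ => ?_)
  unfold pvAval
  split_ifs <;> rfl

-- B in range-indexed normal form (unconditional)
lemma pvB_normal (time_series : List (List (String × Int))) (value_key : String) (lags : List Int) :
    add_lag_features_alt time_series value_key lags
      = (List.range time_series.length).map (fun i =>
          (lags.foldl
            (fun e lag => e.insert ("lag_" ++ PySem.Int.toStr lag)
              ((pvCol (time_series.map (fun d => (PySem.Dict.ofList d).getD value_key 0))
                  (time_series.length : Int) lag).getD i 0))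
            (PySem.Dict.ofList (time_series.getD i []))).items) := by
  simp only [add_lag_features_alt]
  have hinit : time_series.map (fun item => PySem.Dict.ofList (κ := String) (ν := Int) item)
      = (List.range time_series.length).map (fun i => PySem.Dict.ofList (time_series.getD i [])) :=
    pvMap_eq_map_range _ [] time_series
  rw [hinit]
  have hfold := pvB_fold (time_series.map (fun d => (PySem.Dict.ofList d).getD value_key 0)) lags
      time_series.length (by simp)
      (fun i => PySem.Dict.ofList (time_series.getD i []))
  simp only [pvCol] at hfold
  rw [hfold, List.map_map]
  simp only [pvCol]
  rfl

-- ===== VERDICT (by name: the statement is the Claim_ definition above) =====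
theorem add_lag_features_spec : Claim_equal_add_lag_features := by
  intro time_series value_key lags _ hpre
  unfold Spec_add_lag_features
  rw [pvA_normal, pvB_normal]
  rcases hpre with h | h
  · subst h; rfl
  · refine List.map_congr_left (fun i hi => ?_)
    congr 1
    refine PySem.List.foldl_congr_mem _ _ _ _ (fun e lag hmem => ?_)
    rw [pvVal_eq _ time_series.length i lag (by simp) (by simpa using List.mem_range.mp hi) (h lag hmem)]
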